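-- pv_equiv track=rewrite | github.com/TomerMeidan/ZoozMapper | 2ndtable.py | find_common_mac_addresses
-- ===== SOURCE A (Python) =====
-- def find_common_mac_addresses(data):
--     # Identify common MAC addresses across all fingerprints
--     common_macs = None
--     for entry in data:
--         current_macs = set(entry["INSTANCE"]["mWiFiFingerprint"].keys())
--         if common_macs is None:
--             common_macs = current_macs
--         else:
--             common_macs &= current_macs
--     return common_macs
-- ===== SOURCE B (Python) =====
-- def find_common_mac_addresses(data):
--     # Frequency-table reimplementation: count in how many entries each MAC occurs,
--     # then keep the MACs whose count equals the number of entries.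
--     if not data:
--         return None
--     counts = {}
--     for entry in data:
--         for mac in entry["INSTANCE"]["mWiFiFingerprint"]:
--             counts[mac] = counts.get(mac, 0) + 1
--     n = len(data)
--     return {mac for mac, c in counts.items() if c == n}
-- ===== Notes on version B (the rewrite author's own statement) =====
-- stated objective: alternative
-- what changed: Replaces the incremental set-intersection fold with a single frequency table counting, for each MAC, how many entries contain it, followed by one filtering pass keeping the MACs whose count equals the number of entries.
import Mathlib
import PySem

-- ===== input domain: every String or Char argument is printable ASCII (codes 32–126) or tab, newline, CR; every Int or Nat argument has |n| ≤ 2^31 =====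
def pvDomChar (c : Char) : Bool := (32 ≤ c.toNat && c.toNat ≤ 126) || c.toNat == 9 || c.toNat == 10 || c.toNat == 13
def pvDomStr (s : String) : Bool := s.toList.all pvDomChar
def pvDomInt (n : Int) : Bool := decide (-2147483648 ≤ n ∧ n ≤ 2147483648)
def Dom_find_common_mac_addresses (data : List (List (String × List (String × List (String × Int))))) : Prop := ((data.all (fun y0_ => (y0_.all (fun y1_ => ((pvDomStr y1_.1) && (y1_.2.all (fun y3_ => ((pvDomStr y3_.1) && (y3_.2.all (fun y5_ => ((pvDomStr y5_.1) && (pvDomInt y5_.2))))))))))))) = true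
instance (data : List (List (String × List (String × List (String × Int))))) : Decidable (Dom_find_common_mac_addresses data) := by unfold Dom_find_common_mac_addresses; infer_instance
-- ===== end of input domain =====

-- B replaces A's incremental set-intersection fold by a frequency table (count per MAC,
-- then keep those whose count equals the number of entries); same cost, different algorithm.
-- A raises KeyError when an entry lacks "INSTANCE" or it lacks "mWiFiFingerprint": Pre_ excludes exactly those inputs.


-- shared accessor: the key list of entry["INSTANCE"]["mWiFiFingerprint"] (exact under Pre_,
-- where both lookups succeed; dicts arrive as association lists, built with Python's overwrite rule)
def pvFpKeys (entry : List (String × List (String × List (String × Int)))) : List String :=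
  PySem.Dict.keys (PySem.Dict.ofList
    ((PySem.Dict.ofList ((PySem.Dict.ofList entry).getD "INSTANCE" [])).getD "mWiFiFingerprint" []))

-- ===== PORT A =====
def find_common_mac_addresses (data : List (List (String × List (String × List (String × Int))))) : Option (List String) :=
  data.foldl
    (fun common_macs entry =>
      let current_macs : PySem.Set String := PySem.Set.ofList (pvFpKeys entry)
      match common_macs with
      | none => some current_macs
      | some s => some (PySem.Set.inter s current_macs))
    none

-- ===== PORT B =====
def find_common_mac_addresses_alt (data : List (List (String × List (String × List (String × Int))))) : Option (List String) :=
  if data = [] then none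
  else
    let counts : PySem.Dict String Int :=
      data.foldl (fun counts entry =>
        (pvFpKeys entry).foldl (fun counts mac => counts.modify mac 0 (· + 1)) counts)
        PySem.Dict.empty
    let n : Int := data.length
    some (PySem.Set.ofList ((counts.items.filter (fun p => p.2 == n)).map (·.1)))

-- ===== PRECONDITION & SPEC =====
-- Pre_ excludes exactly the inputs where Python A raises KeyError: an entry without an
-- "INSTANCE" key, or whose "INSTANCE" value has no "mWiFiFingerprint" key.
def Pre_find_common_mac_addresses (data : List (List (String × List (String × List (String × Int))))) : Prop :=
  ∀ entry ∈ data,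
    (PySem.Dict.ofList entry).contains "INSTANCE" = true ∧
    (PySem.Dict.ofList ((PySem.Dict.ofList entry).getD "INSTANCE" [])).contains "mWiFiFingerprint" = true
instance (data : List (List (String × List (String × List (String × Int))))) : Decidable (Pre_find_common_mac_addresses data) := by unfold Pre_find_common_mac_addresses; infer_instance

def pvWitness_find_common_mac_addresses : (List (List (String × List (String × List (String × Int))))) :=
  [[("INSTANCE", [("mWiFiFingerprint", [("aa:bb", -40)])])]]

def Spec_find_common_mac_addresses (data : List (List (String × List (String × List (String × Int))))) (out : Option (List String)) : Prop := out = find_common_mac_addresses_alt data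
instance (data : List (List (String × List (String × List (String × Int))))) (out : Option (List String)) : Decidable (Spec_find_common_mac_addresses data out) := by unfold Spec_find_common_mac_addresses; infer_instance

-- ===== CLAIM (what is proved, stated in full; the proofs are below) =====
def Claim_equal_find_common_mac_addresses : Prop := ∀ (data : List (List (String × List (String × List (String × Int))))), Dom_find_common_mac_addresses data → Pre_find_common_mac_addresses data → Spec_find_common_mac_addresses data (find_common_mac_addresses data)

-- ===== LEMMAS AND PROOFS =====

theorem pvSetContains {α : Type} [BEq α] [LawfulBEq α] (l : List α) (k : α) :
    (PySem.Set.ofList l).contains k = l.contains k := by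
  rcases h : l.contains k with _|_ <;> simp_all [PySem.Set.mem_ofList]

theorem pvFpKeys_nodup (e : List (String × List (String × List (String × Int)))) : (pvFpKeys e).Nodup := by
  unfold pvFpKeys; exact PySem.Dict.nodup_keys_ofList _

-- A's fold, once the accumulator is `some s`, stays `some` and intersects.
theorem pvFoldA (rest : List (List (String × List (String × List (String × Int))))) (s : List String) :
    rest.foldl
      (fun common_macs entry =>
        let current_macs : PySem.Set String := PySem.Set.ofList (pvFpKeys entry)
        match common_macs with
        | none => some current_macs
        | some s => some (PySem.Set.inter s current_macs))
      (some s)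
    = some (rest.foldl (fun s entry => PySem.Set.inter s (PySem.Set.ofList (pvFpKeys entry))) s) := by
  induction rest generalizing s with
  | nil => rfl
  | cons e t ih => simp [List.foldl_cons, ih]

-- the intersection fold is one filter by membership in every entry's key set
theorem pvFoldInter (rest : List (List (String × List (String × List (String × Int))))) (s : List String) :
    rest.foldl (fun s entry => PySem.Set.inter s (PySem.Set.ofList (pvFpKeys entry))) s
    = s.filter (fun k => rest.all (fun e => (pvFpKeys e).contains k)) := by
  induction rest generalizing s with
  | nil => simp
  | cons e t ih =>
    rw [List.foldl_cons, ih]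
    simp only [PySem.Set.inter, List.filter_filter, List.all_cons]
    apply List.filter_congr
    intro k hk
    rw [pvSetContains, Bool.and_comm]

-- counting across entries: each entry's key list is Nodup, so the total count is ≤ the number
-- of entries, with equality iff the key is in every entry
theorem pvCountLe (l : List (List (String × List (String × List (String × Int))))) (k : String) :
    ((l.map pvFpKeys).flatten.count k) ≤ l.length := by
  induction l with
  | nil => simp
  | cons e t ih =>
    have h1 : (pvFpKeys e).count k ≤ 1 := List.nodup_iff_count_le_one.mp (pvFpKeys_nodup e) k
    simp only [List.map_cons, List.flatten_cons, List.count_append, List.length_cons]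
    omega

theorem pvCountEq (l : List (List (String × List (String × List (String × Int))))) (k : String) :
    (((l.map pvFpKeys).flatten.count k) = l.length) ↔ ∀ e ∈ l, k ∈ pvFpKeys e := by
  induction l with
  | nil => simp
  | cons e t ih =>
    have h1 : (pvFpKeys e).count k ≤ 1 := List.nodup_iff_count_le_one.mp (pvFpKeys_nodup e) k
    have h2 := pvCountLe t k
    simp only [List.map_cons, List.flatten_cons, List.count_append, List.length_cons, List.mem_cons]
    constructor
    · intro h
      have he : (pvFpKeys e).count k = 1 := by omega
      have ht : (t.map pvFpKeys).flatten.count k = t.length := by omega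
      refine fun x hx => hx.elim (fun hxe => hxe ▸ ?_) (ih.mp ht x)
      exact List.count_pos_iff.mp (by omega)
    · intro h
      have he : (pvFpKeys e).count k = 1 := List.count_eq_one_of_mem (pvFpKeys_nodup e) (h e (Or.inl rfl))
      have ht := ih.mpr (fun x hx => h x (Or.inr hx))
      omega

-- B's returned list, in closed form
theorem pvAltEq (e0 : List (String × List (String × List (String × Int)))) (rest : List (List (String × List (String × List (String × Int))))) :
    find_common_mac_addresses_alt (e0 :: rest)
    = some ((PySem.Set.ofList ((e0 :: rest).map pvFpKeys).flatten).filter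
        (fun k => ((e0 :: rest).map pvFpKeys).flatten.count k == ((e0 :: rest).length : Int))) := by
  show (if (e0 :: rest) = [] then none else _) = _
  rw [if_neg (List.cons_ne_nil e0 rest)]
  rw [← @List.foldl_map _ _ _ pvFpKeys
        (fun c l => l.foldl (fun counts mac => PySem.Dict.modify counts mac 0 (· + 1)) c) (e0 :: rest) PySem.Dict.empty,
      ← List.foldl_flatten, ← PySem.Dict.counter_eq_foldl]
  dsimp only
  rw [PySem.Dict.items_counter]
  rw [List.filter_map, List.map_map]
  congr 1
  have hn : (List.filter (fun k => ((((e0 :: rest).map pvFpKeys).flatten.count k : Int) == ((e0 :: rest).length : Int)))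
      (PySem.Set.ofList ((e0 :: rest).map pvFpKeys).flatten)).Nodup :=
    (PySem.Set.nodup_ofList _).filter _
  rw [← PySem.Set.ofList_eq_self_of_nodup _ hn]
  simp [Function.comp_def]

theorem pvMain (e0 : List (String × List (String × List (String × Int)))) (rest : List (List (String × List (String × List (String × Int))))) :
    (PySem.Set.ofList ((e0 :: rest).map pvFpKeys).flatten).filter
        (fun k => ((e0 :: rest).map pvFpKeys).flatten.count k == ((e0 :: rest).length : Int))
    = (pvFpKeys e0).filter (fun k => rest.all (fun e => (pvFpKeys e).contains k)) := by
  simp only [List.map_cons, List.flatten_cons, List.length_cons]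
  rw [PySem.Set.ofList_append, PySem.Set.ofList_eq_self_of_nodup _ (pvFpKeys_nodup e0),
      PySem.Set.update_eq_append_filter, List.filter_append]
  have h2 : List.filter (fun k => ((List.count k (pvFpKeys e0 ++ (rest.map pvFpKeys).flatten) : Int) == ((rest.length + 1 : Nat) : Int)))
      (((PySem.Set.ofList ((rest.map pvFpKeys).flatten)).filter (fun y => !(PySem.Set.contains (pvFpKeys e0) y)))) = [] := by
    rw [List.filter_eq_nil_iff]
    intro a ha
    rw [List.mem_filter] at ha
    have hnot : a ∉ pvFpKeys e0 := by
      intro hmem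
      have := ha.2
      simp at this
      exact this hmem
    have hz : (pvFpKeys e0).count a = 0 := List.count_eq_zero.mpr hnot
    have hle := pvCountLe rest a
    simp only [List.count_append, hz, Nat.zero_add, beq_iff_eq]
    intro hcontra
    have : ((rest.map pvFpKeys).flatten.count a : Int) = ((rest.length + 1 : Nat) : Int) := hcontra
    omega
  rw [h2, List.append_nil]
  apply List.filter_congr
  intro k hk
  have hc1 : (pvFpKeys e0).count k = 1 := List.count_eq_one_of_mem (pvFpKeys_nodup e0) hk
  simp only [List.count_append, hc1]
  rcases hall : rest.all (fun e => (pvFpKeys e).contains k) with _ | _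
  · rw [beq_eq_false_iff_ne]
    intro hcontra
    have hcnt : (rest.map pvFpKeys).flatten.count k = rest.length := by omega
    have hmemall := (pvCountEq rest k).mp hcnt
    have htrue : rest.all (fun e => (pvFpKeys e).contains k) = true := by
      simp only [List.all_eq_true]
      intro e he
      simpa using hmemall e he
    rw [hall] at htrue
    exact Bool.false_ne_true htrue
  · have hmem : ∀ e ∈ rest, k ∈ pvFpKeys e := by
      intro e he
      have := (List.all_eq_true.mp hall) e he
      simpa using this
    have hcnt := (pvCountEq rest k).mpr hmem
    rw [hcnt, beq_iff_eq]
    push_cast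
    omega

-- ===== VERDICT (by name: the statement is the Claim_ definition above) =====
theorem find_common_mac_addresses_spec : Claim_equal_find_common_mac_addresses := by
  intro data _ _
  unfold Spec_find_common_mac_addresses
  cases data with
  | nil => rfl
  | cons e0 rest =>
    rw [pvAltEq, pvMain]
    show find_common_mac_addresses (e0 :: rest) = _
    unfold find_common_mac_addresses
    rw [List.foldl_cons]
    simp only []
    rw [pvFoldA, pvFoldInter, PySem.Set.ofList_eq_self_of_nodup (pvFpKeys e0) (pvFpKeys_nodup e0)]
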